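-- pv_equiv track=rewrite | github.com/christianebacani/Roadmap | Coding Challenges using Python and SQL/Code Wars Python Solved Problems/7 Kyu/adding_arrays.py | arr_adder
-- ===== SOURCE A (Python) =====
-- def arr_adder(arr: list[str]) -> list[str]:
--     result = ''
--     total_columns = len(arr[0])
--
--     for i in range(total_columns):
--         for j in range(len(arr)):
--             if arr[j][i].isalpha():
--                 result += arr[j][i]
--
--             else:
--                 result += ' '
--
--         result += ' '
--
--     return ' '.join(result.split())
-- ===== SOURCE B (Python) =====
-- def arr_adder(arr: list[str]) -> list[str]:
--     # Streaming state machine: no intermediate masked string, no split().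
--     # Walk the grid column-major; grow the current word on letters, flush it
--     # to the word list on any non-letter and at each column boundary.
--     words = []
--     cur = ''
--     for i in range(len(arr[0])):
--         for row in arr:
--             ch = row[i]
--             if ch.isalpha():
--                 cur += ch
--             elif cur:
--                 words.append(cur)
--                 cur = ''
--         if cur:
--             words.append(cur)
--             cur = ''
--     return ' '.join(words)
-- ===== Notes on version B (the rewrite author's own statement) =====
-- stated objective: alternative
-- what changed: A masks the grid into one sentinel-padded string and recovers the words with a single global .split(); B never builds that string: it streams the grid column-major through a state machine that grows the current word on letters and flushes it on non-letters and column boundaries.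
import Mathlib
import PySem

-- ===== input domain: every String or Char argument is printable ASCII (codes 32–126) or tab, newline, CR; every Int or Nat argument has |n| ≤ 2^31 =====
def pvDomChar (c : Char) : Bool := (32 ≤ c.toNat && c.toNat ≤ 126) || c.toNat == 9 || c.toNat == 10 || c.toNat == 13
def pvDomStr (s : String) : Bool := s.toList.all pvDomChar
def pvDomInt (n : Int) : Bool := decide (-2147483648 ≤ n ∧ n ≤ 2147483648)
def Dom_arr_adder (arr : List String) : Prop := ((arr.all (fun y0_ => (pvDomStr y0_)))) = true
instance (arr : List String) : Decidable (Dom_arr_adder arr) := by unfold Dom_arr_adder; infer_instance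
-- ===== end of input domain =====

-- B replaces A's masked sentinel-padded string + single global split by a streaming
-- state machine over the grid in column-major order (objective: alternative, same cost).

-- ===== PORT A =====
-- result accumulated as List Char; arr[0], arr[j], arr[j][i] ported with pyGetD (defaults
-- unreachable under Pre_arr_adder, which excludes exactly the IndexError inputs).
def arr_adder (arr : List String) : String :=
  let total_columns : Int := PySem.List.len (PySem.List.pyGetD arr 0 "").toList
  let result : List Char :=
    (PySem.List.pyRange 0 total_columns).foldl (fun result i =>
      let result :=
        (PySem.List.pyRange 0 (PySem.List.len arr)).foldl (fun result j =>
          let c := PySem.List.pyGetD (PySem.List.pyGetD arr j "").toList i ' '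
          if PySem.Chars.isalpha c then result ++ [c] else result ++ [' ']) result
      result ++ [' ']) []
  String.mk (PySem.Chars.join " ".toList (PySem.Chars.split₀ result))

-- ===== PORT B =====
-- state machine state: (words so far, current word); row[i] via pyGetD (default
-- unreachable under Pre_arr_adder)
def arr_adder_alt (arr : List String) : String :=
  let st : List (List Char) × List Char :=
    (PySem.List.pyRange 0 (PySem.List.len (PySem.List.pyGetD arr 0 "").toList)).foldl
      (fun st i =>
        let st := arr.foldl (fun (st : List (List Char) × List Char) row =>
          let ch := PySem.List.pyGetD row.toList i ' '
          if PySem.Chars.isalpha ch then (st.1, st.2 ++ [ch])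
          else if st.2 ≠ [] then (st.1 ++ [st.2], []) else st) st
        if st.2 ≠ [] then (st.1 ++ [st.2], []) else st)
      ([], [])
  String.mk (PySem.Chars.join " ".toList st.1)

-- ===== PRECONDITION & SPEC =====
-- Pre_ excludes exactly the inputs where Python A raises IndexError: the empty list
-- (arr[0]) and ragged inputs where some row is shorter than the first row (arr[j][i]).
def Pre_arr_adder (arr : List String) : Prop :=
  arr ≠ [] ∧ ∀ s ∈ arr, (arr.headD "").toList.length ≤ s.toList.length
instance (arr : List String) : Decidable (Pre_arr_adder arr) := by unfold Pre_arr_adder; infer_instance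

def pvWitness_arr_adder : List String := ["ab1", "cd2"]

def Spec_arr_adder (arr : List String) (out : String) : Prop := out = arr_adder_alt arr
instance (arr : List String) (out : String) : Decidable (Spec_arr_adder arr out) := by unfold Spec_arr_adder; infer_instance

-- ===== CLAIM (what is proved, stated in full; the proofs are below) =====
def Claim_equal_arr_adder : Prop := ∀ (arr : List String), Dom_arr_adder arr → Pre_arr_adder arr → Spec_arr_adder arr (arr_adder arr)

-- ===== LEMMAS AND PROOFS =====

-- A's masked character for a raw grid character
def maskCh (c : Char) : Char := if PySem.Chars.isalpha c then c else ' '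

-- B's per-character state-machine step on a raw grid character
def stepCh (st : List (List Char) × List Char) (c : Char) : List (List Char) × List Char :=
  if PySem.Chars.isalpha c then (st.1, st.2 ++ [c])
  else if st.2 ≠ [] then (st.1 ++ [st.2], []) else st

-- split₀.go is independent of its accumulated output list
theorem go_acc (s : List Char) (cur : List Char) (acc : List (List Char)) :
    PySem.Chars.split₀.go s cur acc = acc.reverse ++ PySem.Chars.split₀.go s cur [] := by
  induction s generalizing cur acc with
  | nil => simp [PySem.Chars.split₀.go]; split <;> simp
  | cons c rest ih =>
    simp only [PySem.Chars.split₀.go]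
    split
    · split
      · rw [ih [] acc]
      · rw [ih [] (cur.reverse :: acc), ih [] [cur.reverse]]; simp
    · rw [ih (c :: cur) acc]

-- a space splits the stream: go distributes over it
theorem go_space (xs ys : List Char) (cur : List Char) (acc : List (List Char)) :
    PySem.Chars.split₀.go (xs ++ ' ' :: ys) cur acc =
      PySem.Chars.split₀.go xs cur acc ++ PySem.Chars.split₀.go ys [] [] := by
  induction xs generalizing cur acc with
  | nil =>
    simp only [List.nil_append, PySem.Chars.split₀.go,
      show PySem.Chars.isspace ' ' = true from rfl, if_true]
    split <;> rw [go_acc]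
  | cons c rest ih =>
    simp only [List.cons_append, PySem.Chars.split₀.go]
    split
    · split
      · rw [ih]
      · rw [ih]
    · rw [ih]

theorem split_sep (xs ys : List Char) :
    PySem.Chars.split₀ (xs ++ ' ' :: ys) = PySem.Chars.split₀ xs ++ PySem.Chars.split₀ ys := by
  simp only [PySem.Chars.split₀]; rw [go_space]

-- a letter is never whitespace
theorem isalpha_not_isspace (c : Char) (h : PySem.Chars.isalpha c = true) :
    PySem.Chars.isspace c = false := by
  simp only [PySem.Chars.isalpha, PySem.Chars.isupper, PySem.Chars.islower,
    Bool.or_eq_true, Bool.and_eq_true, decide_eq_true_eq, Char.le_def,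
    UInt32.le_iff_toNat_le,
    show 'A'.val.toNat = 65 from rfl, show 'Z'.val.toNat = 90 from rfl,
    show 'a'.val.toNat = 97 from rfl, show 'z'.val.toNat = 122 from rfl] at h
  simp only [PySem.Chars.isspace, Bool.or_eq_false_iff, Bool.and_eq_false_iff,
    decide_eq_false_iff_not, Char.toNat]
  omega

-- the state machine over raw chars cs, flushed at the end, computes split₀ of the
-- masked chars (go's cur is the reversed current word)
theorem machine_eq_go (cs : List Char) (ws : List (List Char)) (cur : List Char) :
    (let st := cs.foldl stepCh (ws, cur)
     if st.2 ≠ [] then (st.1 ++ [st.2], ([] : List Char)) else st)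
      = (ws ++ PySem.Chars.split₀.go (cs.map maskCh) cur.reverse [], []) := by
  induction cs generalizing ws cur with
  | nil =>
    simp only [List.foldl_nil, List.map_nil, PySem.Chars.split₀.go]
    by_cases h : cur = []
    · subst h; simp
    · simp [h, List.isEmpty_iff]
  | cons c rest ih =>
    simp only [List.foldl_cons, List.map_cons, maskCh, stepCh]
    by_cases ha : PySem.Chars.isalpha c = true
    · simp only [ha, if_true, PySem.Chars.split₀.go, isalpha_not_isspace c ha]
      rw [ih ws (cur ++ [c])]
      simp
    · simp only [ha, if_false, Bool.false_eq_true, PySem.Chars.split₀.go,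
        show PySem.Chars.isspace ' ' = true from rfl, if_true]
      by_cases h : cur = []
      · subst h
        simp only [ne_eq, not_true_eq_false, if_false]
        rw [ih ws []]
        rfl
      · simp only [ne_eq, h, not_false_eq_true, if_true]
        have : cur.reverse.isEmpty = false := by simp [h]
        rw [this, ih (ws ++ [cur]) []]
        simp only [Bool.false_eq_true, if_false]
        rw [go_acc (List.map maskCh rest) [] [cur.reverse.reverse]]
        simp

-- A's inner row loop builds exactly the masked column string
theorem inner_eq_A (arr : List String) (i : Int) (start : List Char) :
    (PySem.List.pyRange 0 (PySem.List.len arr)).foldl (fun result j =>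
      let c := PySem.List.pyGetD (PySem.List.pyGetD arr j "").toList i ' '
      if PySem.Chars.isalpha c then result ++ [c] else result ++ [' ']) start
    = start ++ (arr.map (fun row => PySem.List.pyGetD row.toList i ' ')).map maskCh := by
  rw [PySem.List.foldl_pyRange_pyGetD arr "" (fun result row =>
      let c := PySem.List.pyGetD row.toList i ' '
      if PySem.Chars.isalpha c then result ++ [c] else result ++ [' ']) start (le_refl 0)]
  simp only [Int.toNat_zero, List.drop_zero]
  have h : (fun (result : List Char) (row : String) =>
      let c := PySem.List.pyGetD row.toList i ' '
      if PySem.Chars.isalpha c then result ++ [c] else result ++ [' '])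
    = (fun result row => result ++ [maskCh (PySem.List.pyGetD row.toList i ' ')]) := by
    funext result row; simp only [maskCh]; split <;> rfl
  rw [h, PySem.List.foldl_append_singleton_eq_map]
  rw [List.map_map]
  rfl

-- one global split of space-terminated columns = concatenation of per-column splits
theorem split_flat (L : List Int) (g : Int → List Char) :
    PySem.Chars.split₀ (L.flatMap (fun i => g i ++ [' '])) =
      L.flatMap (fun i => PySem.Chars.split₀ (g i)) := by
  induction L with
  | nil => rfl
  | cons a t ih =>
    simp only [List.flatMap_cons]
    rw [List.append_assoc, List.singleton_append, split_sep, ih]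

-- B's outer loop accumulates the per-column word lists, cur empty at every boundary
theorem outer_eq_B (arr : List String) (L : List Int) (ws : List (List Char)) :
    L.foldl (fun st i =>
        let st := arr.foldl (fun (st : List (List Char) × List Char) row =>
          let ch := PySem.List.pyGetD row.toList i ' '
          if PySem.Chars.isalpha ch then (st.1, st.2 ++ [ch])
          else if st.2 ≠ [] then (st.1 ++ [st.2], []) else st) st
        if st.2 ≠ [] then (st.1 ++ [st.2], []) else st) (ws, [])
    = (ws ++ L.flatMap (fun i =>
        PySem.Chars.split₀ ((arr.map (fun row => PySem.List.pyGetD row.toList i ' ')).map maskCh)), []) := by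
  induction L generalizing ws with
  | nil => simp
  | cons a t ih =>
    simp only [List.foldl_cons]
    have hinner : arr.foldl (fun (st : List (List Char) × List Char) row =>
        let ch := PySem.List.pyGetD row.toList a ' '
        if PySem.Chars.isalpha ch then (st.1, st.2 ++ [ch])
        else if st.2 ≠ [] then (st.1 ++ [st.2], []) else st) (ws, [])
      = (arr.map (fun row => PySem.List.pyGetD row.toList a ' ')).foldl stepCh (ws, []) := by
      rw [List.foldl_map]
      rfl
    rw [hinner]
    have := machine_eq_go (arr.map (fun row => PySem.List.pyGetD row.toList a ' ')) ws []
    simp only at this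
    rw [this, ih]
    simp [PySem.Chars.split₀]

theorem main_eq (arr : List String) : arr_adder arr = arr_adder_alt arr := by
  unfold arr_adder arr_adder_alt
  simp only
  rw [show (fun (result : List Char) (i : Int) =>
        (PySem.List.pyRange 0 (PySem.List.len arr)).foldl (fun result j =>
          let c := PySem.List.pyGetD (PySem.List.pyGetD arr j "").toList i ' '
          if PySem.Chars.isalpha c then result ++ [c] else result ++ [' ']) result ++ [' '])
      = (fun result i => result ++ ((arr.map (fun row => PySem.List.pyGetD row.toList i ' ')).map maskCh ++ [' '])) from by
        funext result i; rw [inner_eq_A]; simp]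
  rw [PySem.List.foldl_append_eq_flatMap]
  simp only [List.nil_append]
  rw [split_flat]
  rw [outer_eq_B]
  simp

-- ===== VERDICT (by name: the statement is the Claim_ definition above) =====
theorem arr_adder_spec : Claim_equal_arr_adder := by
  intro arr _ _
  unfold Spec_arr_adder
  exact main_eq arr
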